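-- pv_equiv track=rewrite | github.com/hamidb80/dfa-sim | build/src.py | stateSamePartition
-- ===== SOURCE A (Python) =====
-- def stateSamePartition(ls_temp_copy):
--
--     ls_same_partition = []
--     ls_temp_copy = ls_temp_copy.copy()
--     i = 0
--
--     while len(ls_temp_copy) > 0:
--         ii = ls_temp_copy[i]
--         temp_list = [ii[0]]
--         j = 1
--
--         while j < len(ls_temp_copy):
--             jj = ls_temp_copy[j]
--             count = 0
--
--             for k in ii[1]:
--                 if k in jj[1]:
--                     count += 1
--
--             if count != 0:
--                 temp_list.append(jj[0])
--                 ls_temp_copy.pop(j)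
--             else:
--                 j += 1
--
--         if len(temp_list) == 1:
--             ls_same_partition.append([ii[0]])
--         elif len(temp_list) != 1:
--             ls_same_partition.append(sorted(list(set(temp_list))))
--
--         ls_temp_copy.pop(i)
--
--     return ls_same_partition
-- ===== SOURCE B (Python) =====
-- def stateSamePartition(ls_temp_copy):
--     # inverted index: element -> positions of entries whose collection contains it
--     index = {}
--     for pos, (_, coll) in enumerate(ls_temp_copy):
--         for e in coll:
--             index.setdefault(e, []).append(pos)
--     out = []
--     removed = set()
--     for pos, (sid, coll) in enumerate(ls_temp_copy):
--         if pos in removed: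
--             continue
--         group = {sid}
--         for e in coll:
--             for q in index[e]:
--                 if q > pos and q not in removed:
--                     removed.add(q)
--                     group.add(ls_temp_copy[q][0])
--         out.append(sorted(group))
--     return out
-- ===== Notes on version B (the rewrite author's own statement) =====
-- stated objective: faster
-- what changed: B replaces A's destructive pop-and-rescan loops (every seed rescans all remaining entries and counts shared elements by a per-element list scan) with an inverted index element->positions built once, then a single left-to-right sweep that marks absorbed positions in a removed-set, so each index list is scanned at most once overall.
import Mathlib
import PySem

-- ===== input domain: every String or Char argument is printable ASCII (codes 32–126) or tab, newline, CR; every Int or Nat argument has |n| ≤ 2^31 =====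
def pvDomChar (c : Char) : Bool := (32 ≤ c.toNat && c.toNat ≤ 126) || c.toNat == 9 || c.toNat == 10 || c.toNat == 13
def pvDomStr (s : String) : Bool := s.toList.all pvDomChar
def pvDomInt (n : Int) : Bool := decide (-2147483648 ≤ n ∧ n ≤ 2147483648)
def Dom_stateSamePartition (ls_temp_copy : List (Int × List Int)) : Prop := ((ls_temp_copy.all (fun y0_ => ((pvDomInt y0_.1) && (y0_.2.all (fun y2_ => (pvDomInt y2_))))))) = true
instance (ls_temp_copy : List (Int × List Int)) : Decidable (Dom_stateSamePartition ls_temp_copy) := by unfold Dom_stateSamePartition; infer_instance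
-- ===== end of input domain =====

-- B builds an inverted index element -> entry positions once, then walks the positions left to
-- right marking absorbed positions in a removed-set, so A's quadratic pop-and-rescan disappears
-- (objective: faster). A only mutates its local copy of the argument, not the caller's list.

-- ===== PORT A =====
-- inner while loop of A: scan ls from index j; jj = ls[j] (always in range, transcribed as getD);
-- count the elements of ii[1] found in jj[1]; if count ≠ 0 pop jj and record its id, else j += 1.
-- fuel is only a totality guard: fuel ≥ ls.length - j makes it never run out (pvInnerA_spec).
def pvInnerA (fuel : Nat) (ii : Int × List Int) (ls : List (Int × List Int)) (temp : List Int)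
    (j : Nat) : List Int × List (Int × List Int) :=
  match fuel with
  | 0 => (temp, ls)
  | fuel + 1 =>
    if j < ls.length then
      if ii.2.foldl (fun c k => if (ls.getD j (0, [])).2.contains k then c + 1 else c) (0 : Int) ≠ 0 then
        pvInnerA fuel ii (ls.eraseIdx j) (temp ++ [(ls.getD j (0, [])).1]) j
      else
        pvInnerA fuel ii ls temp (j + 1)
    else (temp, ls)

-- outer while loop of A (i is always 0; ii = ls[0]; temp_list starts as [ii[0]], j as 1);
-- fuel is only a totality guard: each pass pops index 0, so fuel ≥ ls.length suffices
def pvOuterA (fuel : Nat) (ls : List (Int × List Int)) (acc : List (List Int)) :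
    List (List Int) :=
  match fuel with
  | 0 => acc
  | fuel + 1 =>
    match ls with
    | [] => acc
    | ii :: rest =>
      let r := pvInnerA (ii :: rest).length ii (ii :: rest) [ii.1] 1
      let acc1 := if r.1.length = 1 then acc ++ [[ii.1]]
                  else acc ++ [PySem.List.sorted (PySem.Set.ofList r.1) (fun x => x) false]
      pvOuterA fuel (r.2.eraseIdx 0) acc1

def stateSamePartition (ls_temp_copy : List (Int × List Int)) : List (List Int) :=
  pvOuterA ls_temp_copy.length ls_temp_copy []

-- ===== PORT B =====
-- B (from Source B): build an inverted index element -> list of positions (setdefault/append =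
-- Dict.modify with default []), then for each position not yet in the removed set, mark every
-- later unremoved position found via the index lists of the seed's elements and collect its id.
def pvIndexB (ls : List (Int × List Int)) : PySem.Dict Int (List Int) :=
  (PySem.List.enumerate ls).foldl
    (fun d pe => pe.2.2.foldl (fun d e => d.modify e [] (fun l => l ++ [pe.1])) d)
    PySem.Dict.empty

-- body of 'for q in index[e]': if q > pos and q not in removed: removed.add(q); group.add(id_q)
def pvStepB (pos : Int) (ls : List (Int × List Int))
    (st : PySem.Set Int × PySem.Set Int) (q : Int) : PySem.Set Int × PySem.Set Int :=
  if decide (pos < q) && !(PySem.Set.contains st.1 q) then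
    (PySem.Set.add st.1 q, PySem.Set.add st.2 (PySem.List.pyGetD ls q (0, [])).1)
  else st

-- body of the 'for pos, (sid, coll) in enumerate(...)' loop; state = (removed, out)
def pvOuterB (idx : PySem.Dict Int (List Int)) (ls : List (Int × List Int))
    (st : PySem.Set Int × List (List Int)) (pe : Int × (Int × List Int)) :
    PySem.Set Int × List (List Int) :=
  if PySem.Set.contains st.1 pe.1 then st
  else
    let r := pe.2.2.foldl (fun g e => (idx.getD e []).foldl (pvStepB pe.1 ls) g)
               (st.1, PySem.Set.ofList [pe.2.1])
    (r.1, st.2 ++ [PySem.List.sorted r.2 (fun x => x) false])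

def stateSamePartition_alt (ls_temp_copy : List (Int × List Int)) : List (List Int) :=
  ((PySem.List.enumerate ls_temp_copy).foldl
      (pvOuterB (pvIndexB ls_temp_copy) ls_temp_copy)
      (PySem.Set.empty, [])).2

-- ===== PRECONDITION & SPEC =====
def Spec_stateSamePartition (ls_temp_copy : List (Int × List Int)) (out : List (List Int)) : Prop := out = stateSamePartition_alt ls_temp_copy
instance (ls_temp_copy : List (Int × List Int)) (out : List (List Int)) : Decidable (Spec_stateSamePartition ls_temp_copy out) := by unfold Spec_stateSamePartition; infer_instance

-- ===== CLAIM =====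
def Claim_equal_stateSamePartition : Prop := ∀ (ls_temp_copy : List (Int × List Int)), Dom_stateSamePartition ls_temp_copy → Spec_stateSamePartition ls_temp_copy (stateSamePartition ls_temp_copy)

-- ===== LEMMAS AND PROOFS =====

-- common specification both ports are reduced to: repeatedly take the head as seed, split the
-- rest by nonempty intersection with the seed's element set, emit sorted({sid, *hit ids})
def pvGoB (fuel : Nat) (rest : List (Int × List Int)) (out : List (List Int)) :
    List (List Int) :=
  match fuel with
  | 0 => out
  | fuel + 1 =>
    match rest with
    | [] => out
    | s :: rest' =>
      let sset := PySem.Set.ofList s.2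
      let hits := (rest'.filter (fun t => !(PySem.Set.inter sset t.2).isEmpty)).map Prod.fst
      let rest2 := rest'.filter (fun t => (PySem.Set.inter sset t.2).isEmpty)
      pvGoB fuel rest2 (out ++ [PySem.List.sorted (PySem.Set.ofList (s.1 :: hits)) (fun x => x) false])

-- ---- A equals the specification ----

-- A's match test for a fixed seed ii, as a predicate on an entry
def pvPA (ii t : Int × List Int) : Bool :=
  decide ((ii.2.foldl (fun c k => if t.2.contains k then c + 1 else c) (0 : Int)) ≠ 0)

-- A's count test equals B's nonempty-intersection test
theorem pvPA_eq (ii t : Int × List Int) :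
    pvPA ii t = !(PySem.Set.inter (PySem.Set.ofList ii.2) t.2).isEmpty := by
  rw [pvPA, PySem.List.foldl_if_add_one]
  rw [Bool.eq_iff_iff]
  simp [PySem.Set.inter, PySem.Set.contains, List.isEmpty_eq_false_iff,
    List.countP_eq_length_filter, List.length_eq_zero_iff, List.filter_eq_nil_iff,
    PySem.Set.mem_ofList]

-- characterisation of A's inner loop: with enough fuel it appends the ids of the matching
-- entries past index j to temp and removes those entries from the list
theorem pvInnerA_spec (fuel : Nat) (ii : Int × List Int) :
    ∀ (ls : List (Int × List Int)) (temp : List Int) (j : Nat), ls.length - j ≤ fuel →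
    pvInnerA fuel ii ls temp j =
      (temp ++ ((ls.drop j).filter (pvPA ii)).map Prod.fst,
       ls.take j ++ (ls.drop j).filter (fun t => !pvPA ii t)) := by
  induction fuel with
  | zero =>
      intro ls temp j hf
      rw [pvInnerA, List.drop_of_length_le (by omega), List.take_of_length_le (by omega)]
      simp
  | succ fuel ih =>
      intro ls temp j hf
      rw [pvInnerA]
      by_cases hlt : j < ls.length
      · rw [if_pos hlt]
        have hget : ls.getD j (0, []) = ls[j] := List.getD_eq_getElem ls (0, []) hlt
        have hdropj : ls.drop j = ls[j] :: ls.drop (j + 1) := List.drop_eq_getElem_cons hlt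
        by_cases hc : ii.2.foldl
            (fun c k => if (ls.getD j (0, [])).2.contains k then c + 1 else c) (0 : Int) ≠ 0
        · rw [if_pos hc]
          have hE : ls.eraseIdx j = ls.take j ++ ls.drop (j + 1) :=
            List.eraseIdx_eq_take_drop_succ ls j
          have hlen : (ls.take j).length = j := List.length_take_of_le (le_of_lt hlt)
          have hErs : (ls.eraseIdx j).length = ls.length - 1 := List.length_eraseIdx_of_lt hlt
          rw [ih (ls.eraseIdx j) (temp ++ [(ls.getD j (0, [])).1]) j (by omega)]
          have hdropE : (ls.eraseIdx j).drop j = ls.drop (j + 1) := by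
            rw [hE]; exact List.drop_left' hlen
          have htakeE : (ls.eraseIdx j).take j = ls.take j := by
            rw [hE]; exact List.take_left' hlen
          have hp : pvPA ii ls[j] = true := by
            rw [pvPA]; rw [hget] at hc; exact decide_eq_true hc
          rw [hdropE, htakeE, hget, hdropj,
            List.filter_cons_of_pos (by simp [hp]),
            List.filter_cons_of_neg (by simp [hp])]
          simp
        · rw [if_neg hc]
          rw [ih ls temp (j + 1) (by omega)]
          have hp : pvPA ii ls[j] = false := by
            rw [pvPA]; rw [hget] at hc; simpa using hc
          have htake : ls.take (j + 1) = ls.take j ++ [ls[j]] :=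
            List.take_succ_eq_append_getElem hlt
          rw [htake, hdropj,
            List.filter_cons_of_neg (by simp [hp]),
            List.filter_cons_of_pos (by simp [hp])]
          simp
          rw [htake, List.append_assoc]
          rfl
      · rw [if_neg hlt, List.drop_of_length_le (by omega), List.take_of_length_le (by omega)]
        simp

theorem pvSorted_single (x : Int) :
    PySem.List.sorted (PySem.Set.ofList [x]) (fun y => y) false = [x] := by
  simp [PySem.Set.ofList, PySem.Set.add, PySem.List.sorted, PySem.List.insertBy]

theorem pvOuter_eq (fuel : Nat) : ∀ (ls : List (Int × List Int)) (acc : List (List Int)),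
    ls.length ≤ fuel → pvOuterA fuel ls acc = pvGoB fuel ls acc := by
  induction fuel with
  | zero => intro ls acc h; rw [pvOuterA, pvGoB]
  | succ fuel ih =>
      intro ls acc h
      cases ls with
      | nil => rw [pvOuterA, pvGoB]
      | cons ii rest =>
          rw [pvOuterA, pvGoB,
            pvInnerA_spec (ii :: rest).length ii (ii :: rest) [ii.1] 1 (by omega)]
          simp only [List.drop_succ_cons, List.drop_zero, List.take_succ_cons, List.take_zero]
          have hf1 : rest.filter (fun t => !(PySem.Set.inter (PySem.Set.ofList ii.2) t.2).isEmpty)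
              = rest.filter (pvPA ii) := by
            apply List.filter_congr; intro t _; rw [pvPA_eq]
          have hf2 : rest.filter (fun t => (PySem.Set.inter (PySem.Set.ofList ii.2) t.2).isEmpty)
              = rest.filter (fun t => !pvPA ii t) := by
            apply List.filter_congr; intro t _; rw [pvPA_eq]; simp
          have hrec : (rest.filter (fun t => !pvPA ii t)).length ≤ fuel := by
            have := List.length_filter_le (fun t => !pvPA ii t) rest
            simp at h; omega
          simp only [hf1, hf2, List.singleton_append, List.eraseIdx_cons_zero]
          by_cases hh : rest.filter (pvPA ii) = []
          · rw [hh]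
            simp only [List.map_nil, pvSorted_single]
            rw [if_pos (by simp)]
            exact ih _ _ hrec
          · rw [if_neg (by simp [hh])]
            exact ih _ _ hrec

-- ---- B equals the specification ----

-- fuel irrelevance for the specification
theorem pvGoB_fuel (f1 : Nat) : ∀ (f2 : Nat) (rest : List (Int × List Int)) (out : List (List Int)),
    rest.length ≤ f1 → rest.length ≤ f2 → pvGoB f1 rest out = pvGoB f2 rest out := by
  induction f1 with
  | zero =>
      intro f2 rest out h1 h2
      have hrest : rest = [] := by cases rest with | nil => rfl | cons a t => simp at h1
      subst hrest
      cases f2 <;> rfl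
  | succ f1 ih =>
      intro f2 rest out h1 h2
      cases rest with
      | nil => cases f2 <;> rfl
      | cons s rest' =>
          cases f2 with
          | zero => simp at h2
          | succ f2 =>
              rw [pvGoB, pvGoB]
              have hle := List.length_filter_le
                (fun t => (PySem.Set.inter (PySem.Set.ofList s.2) t.2).isEmpty) rest'
              simp only [List.length_cons] at h1 h2
              exact ih f2 _ _ (by omega) (by omega)

-- the inverted index, characterised: q is listed under e iff some entry at position q has e
theorem pvMem_index (ls : List (Int × List Int)) (e q : Int) :
    q ∈ (pvIndexB ls).getD e [] ↔
      ∃ (j : Nat) (h : j < ls.length), q = (j : Int) ∧ e ∈ (ls[j]).2 := by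
  have h1 : pvIndexB ls =
      ((PySem.List.enumerate ls).flatMap (fun pe => pe.2.2.map (fun x => (x, pe.1)))).foldl
        (fun d p => d.modify p.1 [] (fun l => l ++ [p.2])) PySem.Dict.empty := by
    unfold pvIndexB
    rw [List.foldl_flatMap]
    congr 1
    funext d pe
    rw [List.foldl_map]
  rw [h1, PySem.Dict.getD_foldl_modify_append]
  have hemp : (PySem.Dict.empty : PySem.Dict Int (List Int)).getD e [] = [] := rfl
  rw [hemp, List.nil_append]
  simp only [List.mem_map, List.mem_filter, List.mem_flatMap, PySem.List.mem_enumerate_iff]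
  constructor
  · rintro ⟨p, ⟨⟨pe, ⟨⟨k, hk, hpe⟩, hp⟩⟩, hbe⟩, hq⟩
    subst hpe
    simp only at hp
    obtain ⟨x, hx, hxp⟩ := hp
    subst hxp
    simp only at hbe hq
    refine ⟨k, hk, by omega, ?_⟩
    rwa [show x = e from by simpa using hbe] at hx
  · rintro ⟨j, hj, hq, he⟩
    refine ⟨(e, (j : Int)), ⟨⟨((j : Int), ls[j]), ⟨j, hj, by simp⟩, ?_⟩, by simp⟩, hq.symm⟩
    exact ⟨e, he, rfl⟩

-- characterisation of the inner marking fold over a flat list of candidate positions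
theorem pvInner_char (pos : Int) (ls : List (Int × List Int)) (R0 : List Int) (qs : List Int) :
    ∀ (R G : List Int),
      (∀ x ∈ R0, x ∈ R) →
      (∀ q, q ∈ R → q ∉ R0 → pos < q ∧ (PySem.List.pyGetD ls q (0, [])).1 ∈ G) →
      G.Nodup →
      (∀ x, x ∈ (qs.foldl (pvStepB pos ls) (R, G)).1 ↔ x ∈ R ∨ (pos < x ∧ x ∉ R0 ∧ x ∈ qs)) ∧
      (∀ y, y ∈ (qs.foldl (pvStepB pos ls) (R, G)).2 ↔
          y ∈ G ∨ ∃ q, q ∈ qs ∧ pos < q ∧ q ∉ R0 ∧ y = (PySem.List.pyGetD ls q (0, [])).1) ∧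
      (qs.foldl (pvStepB pos ls) (R, G)).2.Nodup := by
  induction qs with
  | nil =>
      intro R G h0 hInv hN
      refine ⟨fun x => by simp, fun y => by simp, hN⟩
  | cons q qs ih =>
      intro R G h0 hInv hN
      simp only [List.foldl_cons]
      by_cases hyes : pos < q ∧ q ∉ R
      · obtain ⟨hpos, hmem⟩ := hyes
        have hqR0 : q ∉ R0 := fun h => hmem (h0 q h)
        have hg : pvStepB pos ls (R, G) q =
            (PySem.Set.add R q, PySem.Set.add G (PySem.List.pyGetD ls q (0, [])).1) := by
          simp [pvStepB, hpos, hmem]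
        rw [hg]
        have h0' : ∀ x ∈ R0, x ∈ PySem.Set.add R q :=
          fun x hx => (PySem.Set.mem_add _ _ _).2 (Or.inl (h0 x hx))
        have hInv' : ∀ q', q' ∈ PySem.Set.add R q → q' ∉ R0 →
            pos < q' ∧ (PySem.List.pyGetD ls q' (0, [])).1 ∈
              PySem.Set.add G (PySem.List.pyGetD ls q (0, [])).1 := by
          intro q' hq' hq'0
          rcases (PySem.Set.mem_add _ _ _).1 hq' with h | h
          · exact ⟨(hInv q' h hq'0).1, (PySem.Set.mem_add _ _ _).2 (Or.inl (hInv q' h hq'0).2)⟩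
          · subst h; exact ⟨hpos, (PySem.Set.mem_add _ _ _).2 (Or.inr rfl)⟩
        obtain ⟨hA, hB, hC⟩ := ih (PySem.Set.add R q)
          (PySem.Set.add G (PySem.List.pyGetD ls q (0, [])).1) h0' hInv'
          (PySem.Set.nodup_add _ _ hN)
        refine ⟨?_, ?_, hC⟩
        · intro x
          rw [hA x]
          simp only [PySem.Set.mem_add, List.mem_cons]
          constructor
          · rintro ((h | h) | ⟨h1, h2, h3⟩)
            · exact Or.inl h
            · subst h; exact Or.inr ⟨hpos, hqR0, Or.inl rfl⟩
            · exact Or.inr ⟨h1, h2, Or.inr h3⟩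
          · rintro (h | ⟨h1, h2, h3 | h3⟩)
            · exact Or.inl (Or.inl h)
            · subst h3; exact Or.inl (Or.inr rfl)
            · exact Or.inr ⟨h1, h2, h3⟩
        · intro y
          rw [hB y]
          simp only [PySem.Set.mem_add, List.mem_cons]
          constructor
          · rintro ((h | h) | ⟨q', hq1, hq2, hq3, hq4⟩)
            · exact Or.inl h
            · exact Or.inr ⟨q, Or.inl rfl, hpos, hqR0, h⟩
            · exact Or.inr ⟨q', Or.inr hq1, hq2, hq3, hq4⟩
          · rintro (h | ⟨q', h1 | h1, h2, h3, h4⟩)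
            · exact Or.inl (Or.inl h)
            · subst h1; exact Or.inl (Or.inr h4)
            · exact Or.inr ⟨q', h1, h2, h3, h4⟩
      · have hcc : ¬ pos < q ∨ q ∈ R := by tauto
        have hg : pvStepB pos ls (R, G) q = (R, G) := by
          rcases hcc with h | h <;> simp [pvStepB, h]
        rw [hg]
        obtain ⟨hA, hB, hC⟩ := ih R G h0 hInv hN
        refine ⟨?_, ?_, hC⟩
        · intro x
          rw [hA x]
          simp only [List.mem_cons]
          constructor
          · rintro (h | ⟨h1, h2, h3⟩)
            · exact Or.inl h
            · exact Or.inr ⟨h1, h2, Or.inr h3⟩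
          · rintro (h | ⟨h1, h2, h3 | h3⟩)
            · exact Or.inl h
            · subst h3
              rcases hcc with h | h
              · exact absurd h1 h
              · exact Or.inl h
            · exact Or.inr ⟨h1, h2, h3⟩
        · intro y
          rw [hB y]
          simp only [List.mem_cons]
          constructor
          · rintro (h | ⟨q', h1, h2, h3, h4⟩)
            · exact Or.inl h
            · exact Or.inr ⟨q', Or.inr h1, h2, h3, h4⟩
          · rintro (h | ⟨q', h1 | h1, h2, h3, h4⟩)
            · exact Or.inl h
            · subst h1
              rcases hcc with h | h
              · exact absurd h2 h
              · exact Or.inl (h4 ▸ (hInv q' h h3).2)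
            · exact Or.inr ⟨q', h1, h2, h3, h4⟩

theorem pvShare_iff (u v : List Int) :
    (PySem.Set.inter (PySem.Set.ofList u) v).isEmpty = true ↔ ∀ x ∈ u, x ∉ v := by
  simp [PySem.Set.inter, PySem.Set.contains, List.isEmpty_iff, List.filter_eq_nil_iff,
    PySem.Set.mem_ofList]

theorem pvNotContains (s : PySem.Set Int) (x : Int) :
    (!(PySem.Set.contains s x)) = true ↔ x ∉ s := by
  simp

-- members of an enumerated suffix of ls are exactly the pairs (j, ls[j]) with m ≤ j
theorem pvMem_enum_drop (ls tail : List (Int × List Int)) (m : Nat) (h : ls.drop m = tail)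
    (pe : Int × (Int × List Int)) :
    pe ∈ PySem.List.enumerate tail (m : Int) ↔
      ∃ (j : Nat) (hj : j < ls.length), m ≤ j ∧ pe = ((j : Int), ls[j]) := by
  subst h
  rw [PySem.List.mem_enumerate_iff]
  have hlen : (ls.drop m).length = ls.length - m := by simp
  constructor
  · rintro ⟨k, hk, rfl⟩
    refine ⟨m + k, by omega, by omega, ?_⟩
    rw [Prod.mk.injEq]
    refine ⟨by omega, ?_⟩
    rw [List.getElem_drop]
  · rintro ⟨j, hj, hmj, rfl⟩
    refine ⟨j - m, by omega, ?_⟩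
    rw [Prod.mk.injEq]
    refine ⟨by omega, ?_⟩
    rw [List.getElem_drop]
    congr 1
    omega

-- the outer loop from position m with removed-set R computes the spec of the unremoved suffix
theorem pvOuterB_spec (ls : List (Int × List Int)) :
    ∀ (tail : List (Int × List Int)) (m : Nat) (R : PySem.Set Int) (acc : List (List Int)),
      ls.drop m = tail →
      ((PySem.List.enumerate tail m).foldl (pvOuterB (pvIndexB ls) ls) (R, acc)).2 =
        pvGoB (((PySem.List.enumerate tail m).filter
                  (fun pe => !(PySem.Set.contains R pe.1))).map (·.2)).length
              (((PySem.List.enumerate tail m).filter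
                  (fun pe => !(PySem.Set.contains R pe.1))).map (·.2)) acc := by
  intro tail
  induction tail with
  | nil =>
      intro m R acc h
      simp [PySem.List.enumerate_nil, pvGoB]
  | cons e tail' ih =>
      intro m R acc h
      have h' : ls.drop (m + 1) = tail' := by
        have hd : ls.drop (m + 1) = (ls.drop m).drop 1 := by rw [List.drop_drop]
        rw [hd, h]
        rfl
      have hcast : ((m : Int) + 1) = (((m + 1 : Nat)) : Int) := by push_cast; ring
      rw [PySem.List.enumerate_cons, hcast, List.foldl_cons, List.filter_cons]
      by_cases hmem : ((m : Int)) ∈ R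
      · have hct : PySem.Set.contains R ((m : Int)) = true := (PySem.Set.contains_iff _ _).2 hmem
        have hstep : pvOuterB (pvIndexB ls) ls (R, acc) (((m : Int)), e) = (R, acc) := by
          simp [pvOuterB, hmem]
        rw [hstep, hct]
        simp only [Bool.not_true, Bool.false_eq_true, if_false]
        exact ih (m + 1) R acc h'
      · have hcf : PySem.Set.contains R ((m : Int)) = false := by
          rw [Bool.eq_false_iff]
          intro hx
          exact hmem ((PySem.Set.contains_iff _ _).1 hx)
        -- flatten the nested marking loops of the step into one fold over qs
        set qs : List Int := e.2.flatMap (fun el => (pvIndexB ls).getD el []) with hqsdef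
        set r : PySem.Set Int × PySem.Set Int :=
          qs.foldl (pvStepB ((m : Int)) ls) (R, PySem.Set.ofList [e.1]) with hrdef
        have hstep : pvOuterB (pvIndexB ls) ls (R, acc) (((m : Int)), e) =
            (r.1, acc ++ [PySem.List.sorted r.2 (fun x => x) false]) := by
          simp only [pvOuterB, hcf, Bool.false_eq_true, if_false, hrdef, hqsdef]
          rw [List.foldl_flatMap]
        rw [hstep, ih (m + 1) r.1 _ h']
        -- the inner fold characterised (R0 := R, seed group {e.1})
        obtain ⟨hA, hB, hC⟩ := pvInner_char ((m : Int)) ls R qs R (PySem.Set.ofList [e.1])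
          (fun x hx => hx) (fun q hq hq0 => absurd hq hq0) (PySem.Set.nodup_ofList _)
        rw [hcf]
        simp only [Bool.not_false, if_true, List.map_cons, List.length_cons]
        conv_rhs => rw [pvGoB]
        -- abbreviations for the two remainder lists
        set E' := PySem.List.enumerate tail' (((m + 1 : Nat)) : Int) with hE'def
        set remT := (E'.filter (fun pe => !(PySem.Set.contains R pe.1))).map
          (fun pe => pe.2) with hremTdef
        -- pointwise: surviving r.1 = surviving R and not sharing with the seed
        have hpt : ∀ pe ∈ E', (!(PySem.Set.contains r.1 pe.1)) =
            ((PySem.Set.inter (PySem.Set.ofList e.2) pe.2.2).isEmpty &&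
             (!(PySem.Set.contains R pe.1))) := by
          intro pe hpe
          obtain ⟨j, hj, hmj, rfl⟩ := (pvMem_enum_drop ls tail' (m + 1) h' pe).1 hpe
          have hqs : ((j : Int) ∈ qs) ↔ ∃ el ∈ e.2, el ∈ (ls[j]).2 := by
            rw [hqsdef]
            simp only [List.mem_flatMap]
            constructor
            · rintro ⟨el, hel, hq⟩
              obtain ⟨j', hj', hjq, he'⟩ := (pvMem_index ls el ((j : Int))).1 hq
              have hjj : j = j' := by exact_mod_cast hjq
              subst hjj
              exact ⟨el, hel, he'⟩
            · rintro ⟨el, hel, he'⟩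
              exact ⟨el, hel, (pvMem_index ls el ((j : Int))).2 ⟨j, hj, rfl, he'⟩⟩
          have hmlt : ((m : Int)) < ((j : Int)) := by exact_mod_cast (by omega : m < j)
          have hr1 : ((j : Int) ∈ r.1) ↔ ((j : Int) ∈ R ∨ (j : Int) ∈ qs) := by
            rw [hA]
            constructor
            · rintro (hx | ⟨_, _, hx⟩)
              · exact Or.inl hx
              · exact Or.inr hx
            · rintro (hx | hx)
              · exact Or.inl hx
              · by_cases hR : ((j : Int)) ∈ R
                · exact Or.inl hR
                · exact Or.inr ⟨hmlt, hR, hx⟩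
          rw [Bool.eq_iff_iff, pvNotContains, Bool.and_eq_true, pvNotContains, pvShare_iff]
          constructor
          · intro hn
            refine ⟨fun x hx hxm => hn (hr1.2 (Or.inr (hqs.2 ⟨x, hx, hxm⟩))),
                    fun hR => hn (hr1.2 (Or.inl hR))⟩
          · rintro ⟨hall, hnR⟩ hmem'
            rcases hr1.1 hmem' with hx | hx
            · exact hnR hx
            · obtain ⟨el, hel, hem⟩ := hqs.1 hx
              exact hall el hel hem
        -- the filtered remainder after the step is the spec's filtered rest
        have hrem : (E'.filter (fun pe => !(PySem.Set.contains r.1 pe.1))).map (fun pe => pe.2) =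
            remT.filter (fun t => (PySem.Set.inter (PySem.Set.ofList e.2) t.2).isEmpty) := by
          rw [hremTdef, List.filter_map, List.filter_filter, List.filter_congr hpt]
          rfl
        -- the emitted group is the spec's sorted({sid, *hit ids})
        have hgrp : PySem.List.sorted r.2 (fun x => x) false =
            PySem.List.sorted (PySem.Set.ofList (e.1 ::
              (remT.filter (fun t => !(PySem.Set.inter (PySem.Set.ofList e.2) t.2).isEmpty)).map
                Prod.fst)) (fun x => x) false := by
          rw [PySem.List.sorted_id_eq_sorted_id_iff_perm]
          apply List.perm_of_nodup_nodup_toFinset_eq hC (PySem.Set.nodup_ofList _)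
          ext y
          rw [List.mem_toFinset, List.mem_toFinset, hB y]
          simp only [PySem.Set.mem_ofList, List.mem_cons, List.not_mem_nil, or_false]
          constructor
          · rintro (hy | ⟨q, hq, hmq, hnR, rfl⟩)
            · exact Or.inl hy
            · obtain ⟨el, hel, hq'⟩ := List.mem_flatMap.1 (hqsdef ▸ hq)
              obtain ⟨j, hj, rfl, he'⟩ := (pvMem_index ls el q).1 hq'
              refine Or.inr ?_
              rw [List.mem_map]
              refine ⟨((j : Int), ls[j]).2, ?_, ?_⟩
              · rw [List.mem_filter, hremTdef, List.mem_map]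
                refine ⟨⟨((j : Int), ls[j]), ?_, rfl⟩, ?_⟩
                · rw [List.mem_filter]
                  refine ⟨(pvMem_enum_drop ls tail' (m + 1) h' _).2
                    ⟨j, hj, by exact_mod_cast hmq, rfl⟩, (pvNotContains _ _).2 hnR⟩
                · rw [Bool.not_eq_true', Bool.eq_false_iff]
                  intro hie
                  exact absurd he' ((pvShare_iff _ _).1 hie el hel)
              · rw [PySem.List.pyGetD_natCast, List.getD_eq_getElem ls _ hj]
          · rintro (hy | hy)
            · exact Or.inl hy
            · rw [List.mem_map] at hy
              obtain ⟨t, ht, rfl⟩ := hy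
              rw [List.mem_filter, hremTdef, List.mem_map] at ht
              obtain ⟨⟨pe, hpe, rfl⟩, hsh⟩ := ht
              rw [List.mem_filter] at hpe
              obtain ⟨hpeE, hpeR⟩ := hpe
              obtain ⟨j, hj, hmj, rfl⟩ := (pvMem_enum_drop ls tail' (m + 1) h' pe).1 hpeE
              have hshE : ¬ ((PySem.Set.inter (PySem.Set.ofList e.2)
                  ((((j : Int)), ls[j]) : Int × (Int × List Int)).2.2).isEmpty = true) := by
                rw [Bool.not_eq_true'] at hsh
                simp [hsh]
              rw [pvShare_iff] at hshE
              push Not at hshE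
              obtain ⟨el, hel, hem⟩ := hshE
              refine Or.inr ⟨((j : Int)), ?_, by exact_mod_cast (by omega : m < j),
                (pvNotContains _ _).1 hpeR, ?_⟩
              · rw [hqsdef, List.mem_flatMap]
                exact ⟨el, hel, (pvMem_index ls el _).2 ⟨j, hj, rfl, hem⟩⟩
              · rw [PySem.List.pyGetD_natCast, List.getD_eq_getElem ls _ hj]
        rw [hrem, hgrp]
        apply pvGoB_fuel
        · exact le_rfl
        · exact le_trans (List.length_filter_le _ _)
            (le_of_eq (by rw [hremTdef, List.length_map]))

theorem pvAlt_eq_spec (ls : List (Int × List Int)) :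
    stateSamePartition_alt ls = pvGoB ls.length ls [] := by
  unfold stateSamePartition_alt
  have h := pvOuterB_spec ls ls 0 PySem.Set.empty [] (by simp)
  simp only [Nat.cast_zero] at h
  rw [h]
  have hfil : (PySem.List.enumerate ls 0).filter
      (fun pe => !(PySem.Set.contains PySem.Set.empty pe.1)) = PySem.List.enumerate ls 0 := by
    apply List.filter_eq_self.2
    intro a _
    simp [PySem.Set.contains, PySem.Set.empty]
  rw [hfil, PySem.List.map_snd_enumerate]

-- ===== VERDICT =====
theorem stateSamePartition_spec : Claim_equal_stateSamePartition := by
  intro ls _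
  unfold Spec_stateSamePartition stateSamePartition
  rw [pvAlt_eq_spec]
  exact pvOuter_eq ls.length ls [] le_rfl
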